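-- pv_equiv track=rewrite | github.com/ksy2575/clone_algorithm | PROGRAMMERS/PROGRAMMERS monthly test-April.py | solution
-- ===== SOURCE A (Python) =====
-- from collections import defaultdict
-- from collections import defaultdict
-- from collections import defaultdict
--
-- def dfs(curr, a, dict, visited):
--     cnt = 0
--     visited.add(curr)
--     for next in dict[curr]:
--       if next not in visited:
--
--         value, child = dfs(next, a, dict, visited)
--
--         a[curr] += value
--         cnt += child
--
--     retVal = a[curr]
--     a[curr] = 0
--     return retVal, abs(retVal)+cnt
--
-- def solution(a, edges):
--     set1 = set([i for i in range(len(a))])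
--     dict = defaultdict(set)
--     for edge in edges:
--       dict[edge[0]].add(edge[1])
--       dict[edge[1]].add(edge[0])
--     for key in dict:
--       if len(dict[key]) == 1:
--         start = key
--         break
--     visited = set()
--     value, answer = dfs(start, a, dict, visited)
--     return answer if value == 0 else -1
-- ===== SOURCE B (Python) =====
-- def solution(a, edges):
--     adj = {}
--     for e in edges:
--         u, v = e[0], e[1]
--         lu = adj.setdefault(u, [])
--         if v not in lu:
--             lu.append(v)
--         lv = adj.setdefault(v, [])
--         if u not in lv:
--             lv.append(u)
--     start = None
--     for k, ns in adj.items():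
--         if len(ns) == 1:
--             start = k
--             break
--     visited = {start}
--     stack = [(start, 0, 0)]
--     value = answer = None
--     while stack:
--         curr, i, cnt = stack[-1]
--         ns = adj[curr]
--         if i < len(ns):
--             stack[-1] = (curr, i + 1, cnt)
--             nxt = ns[i]
--             if nxt not in visited:
--                 visited.add(nxt)
--                 stack.append((nxt, 0, 0))
--         else:
--             ret = a[curr]
--             a[curr] = 0
--             child = abs(ret) + cnt
--             stack.pop()
--             if stack:
--                 p, j, c = stack[-1]
--                 stack[-1] = (p, j, c + child)
--                 a[p] += ret
--             else:
--                 value, answer = ret, child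
--     return answer if value == 0 else -1
-- ===== Notes on version B (the rewrite author's own statement) =====
-- stated objective: alternative
-- what changed: Replaces A's recursive visited-set DFS over defaultdict-of-sets by an explicit-stack iterative post-order traversal over insertion-ordered adjacency lists: frames hold (node, next-neighbour index, accumulated move count), and popping a frame folds its value and count into the parent frame.
-- outside the precondition, e.g. on solution([2, -1, -1, 0], [[0, 1], [1, 2], [2, 0], [2, 3]]): A returns 2, B returns 3; on solution([0, 2, -2], [[-2, 2], [-1, 2], [1, 2]]): A returns 2, B returns 4
import Mathlib
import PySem

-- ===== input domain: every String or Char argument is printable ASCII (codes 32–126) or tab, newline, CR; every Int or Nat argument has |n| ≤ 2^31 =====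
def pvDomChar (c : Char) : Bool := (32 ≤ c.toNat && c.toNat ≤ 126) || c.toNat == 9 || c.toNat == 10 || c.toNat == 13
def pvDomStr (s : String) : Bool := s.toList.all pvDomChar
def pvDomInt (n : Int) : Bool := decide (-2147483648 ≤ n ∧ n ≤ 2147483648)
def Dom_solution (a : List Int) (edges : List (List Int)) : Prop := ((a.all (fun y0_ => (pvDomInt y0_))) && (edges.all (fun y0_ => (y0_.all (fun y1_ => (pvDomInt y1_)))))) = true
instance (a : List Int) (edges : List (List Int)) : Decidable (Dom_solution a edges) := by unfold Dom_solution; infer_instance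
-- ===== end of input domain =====

-- B replaces A's recursive visited-set DFS (sets in a defaultdict) by an explicit-stack iterative
-- post-order over adjacency lists; same return value on Pre_. Both A and B mutate the Python list
-- `a` in place (the same cells end up zeroed); the equivalence proved here is about the return value.

-- ===== PORT A =====
def buildA (edges : List (List Int)) : PySem.Dict Int (PySem.Set Int) :=
  edges.foldl (fun d e =>
    (d.modify (PySem.List.pyGetD e 0 0) PySem.Set.empty
        (fun s => PySem.Set.add s (PySem.List.pyGetD e 1 0))).modify
      (PySem.List.pyGetD e 1 0) PySem.Set.empty
        (fun s => PySem.Set.add s (PySem.List.pyGetD e 0 0))) PySem.Dict.empty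

mutual
def dfsA (d : PySem.Dict Int (PySem.Set Int)) (f : Nat) (curr : Int) (a : List Int)
    (vis : PySem.Set Int) : Option (List Int × PySem.Set Int × Int × Int) :=
  match f with
  | 0 => none
  | f + 1 => goA d f curr (PySem.Dict.getD d curr PySem.Set.empty) a (PySem.Set.add vis curr) 0
  termination_by (f, 0, 0)

def goA (d : PySem.Dict Int (PySem.Set Int)) (f : Nat) (curr : Int) (ns : List Int)
    (a : List Int) (vis : PySem.Set Int) (cnt : Int) :
    Option (List Int × PySem.Set Int × Int × Int) :=
  match ns with
  | [] =>
      let retVal := PySem.List.pyGetD a curr 0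
      some (PySem.List.pySetD a curr 0, vis, retVal, |retVal| + cnt)
  | nxt :: ns' =>
      if PySem.Set.contains vis nxt then goA d f curr ns' a vis cnt
      else
        match dfsA d f nxt a vis with
        | none => none
        | some (a1, vis1, value, child) =>
            goA d f curr ns' (PySem.List.pySetD a1 curr (PySem.List.pyGetD a1 curr 0 + value))
              vis1 (cnt + child)
  termination_by (f, 1, ns.length)
end

def solution (a : List Int) (edges : List (List Int)) : Int :=
  let _set1 := PySem.Set.ofList (PySem.List.pyRange 0 (a.length : Int) 1)
  let d := buildA edges
  match (PySem.Dict.keys d).find? (fun k => (PySem.Dict.getD d k PySem.Set.empty).length == 1) with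
  | none => 0   -- Python: NameError (start unbound); outside Pre_
  | some start =>
    -- fuel bounds the recursion depth (≤ number of vertices ≤ 2·|edges|); a pure totality guard
    match dfsA d (2 * edges.length + 2) start a PySem.Set.empty with
    | none => 0  -- unreachable under Pre_
    | some (_, _, value, answer) => if value == 0 then answer else -1

-- ===== PORT B =====
def buildB (edges : List (List Int)) : PySem.Dict Int (List Int) :=
  edges.foldl (fun d e =>
    (d.modify (PySem.List.pyGetD e 0 0) []
        (fun l => if l.contains (PySem.List.pyGetD e 1 0) then l
                  else l ++ [PySem.List.pyGetD e 1 0])).modify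
      (PySem.List.pyGetD e 1 0) []
        (fun l => if l.contains (PySem.List.pyGetD e 0 0) then l
                  else l ++ [PySem.List.pyGetD e 0 0])) PySem.Dict.empty

-- frame = (node, next neighbour index, accumulated move count)
def runB (d : PySem.Dict Int (List Int)) (f : Nat) (stack : List (Int × Nat × Int))
    (a : List Int) (vis : PySem.Set Int) : Option (List Int × Int × Int) :=
  match f, stack with
  | 0, _ => none
  | _ + 1, [] => none   -- unreachable: the last pop returns
  | f + 1, (curr, i, cnt) :: rest =>
    let ns := PySem.Dict.getD d curr []
    if h : i < ns.length then
      let nxt := ns[i]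
      if PySem.Set.contains vis nxt then runB d f ((curr, i + 1, cnt) :: rest) a vis
      else runB d f ((nxt, 0, 0) :: (curr, i + 1, cnt) :: rest) a (PySem.Set.add vis nxt)
    else
      let ret := PySem.List.pyGetD a curr 0
      let a' := PySem.List.pySetD a curr 0
      let child := |ret| + cnt
      match rest with
      | [] => some (a', ret, child)
      | (p, j, c) :: rs =>
          runB d f ((p, j, c + child) :: rs)
            (PySem.List.pySetD a' p (PySem.List.pyGetD a' p 0 + ret)) vis

def solution_alt (a : List Int) (edges : List (List Int)) : Int :=
  let d := buildB edges
  match (PySem.Dict.items d).find? (fun kv => kv.2.length == 1) with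
  | none => 0   -- Python: start is None, adj[None] raises; outside Pre_
  | some kv =>
    -- fuel is a totality guard for the while loop, provably sufficient under Pre_
    match runB d ((2 * edges.length + 2) ^ (2 * edges.length + 3) + 1) [(kv.1, 0, 0)] a
        (PySem.Set.add PySem.Set.empty kv.1) with
    | none => 0  -- unreachable under Pre_
    | some (_, value, answer) => if value == 0 then answer else -1

-- ===== PRECONDITION & SPEC =====
-- descriptive helpers over the raw input (they do not touch the ports)
def pvPairs (edges : List (List Int)) : List (Int × Int) :=
  edges.flatMap (fun e => [(e.getD 0 0, e.getD 1 0), (e.getD 1 0, e.getD 0 0)])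
def pvVerts (edges : List (List Int)) : List Int := (pvPairs edges).map (·.1)
def pvInc (edges : List (List Int)) (v : Int) : List Int :=
  ((pvPairs edges).filter (fun p => p.1 == v)).map (·.2)
def pvDeg (E : List (Int × Int)) (x : Int) : Nat :=
  (E.filter (fun p => p.1 == x || p.2 == x)).length
def pvPrune (E : List (Int × Int)) : List (Int × Int) :=
  E.filter (fun p => decide (2 ≤ pvDeg E p.1) && decide (2 ≤ pvDeg E p.2))

-- closure of {s} under the (deduplicated) adjacency: exactly the vertices A's dfs traverses
def pvNbrs (edges : List (List Int)) (v : Int) : PySem.Set Int := PySem.Set.ofList (pvInc edges v)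
def pvComp (edges : List (List Int)) (s : Int) : PySem.Set Int :=
  (fun S => PySem.Set.update S (S.flatMap (pvNbrs edges)))^[(pvVerts edges).length]
    (PySem.Set.add PySem.Set.empty s)

-- Pre_ excludes the inputs on which A raises (empty edge list, edges shorter than 2, no degree-1
-- vertex, a traversed label outside [-len(a), len(a))) and, on the traversed component only,
-- restricts to the task's natural domain — labels naming distinct cells of `a` and edges forming
-- a tree (after set-deduplication, self-loops aside) — because when the traversed component has a
-- cycle, or two traversed labels alias the same cell through Python's negative-index wraparound,
-- A's returned value depends on Python's unspecified set iteration order.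
def Pre_solution (a : List Int) (edges : List (List Int)) : Prop :=
  edges ≠ [] ∧
  (∀ e ∈ edges, 2 ≤ e.length) ∧
  (∃ v ∈ pvVerts edges, (PySem.Set.ofList (pvInc edges v)).length = 1) ∧
  (∀ s ∈ ((pvVerts edges).find?
      (fun v => (PySem.Set.ofList (pvInc edges v)).length == 1)).toList,
    (∀ v ∈ pvComp edges s, -(a.length : Int) ≤ v ∧ v < (a.length : Int)) ∧
    (∀ u ∈ pvComp edges s, ∀ v ∈ pvComp edges s, u ≠ v →
        u - v ≠ (a.length : Int) ∧ v - u ≠ (a.length : Int)) ∧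
    (pvPrune^[edges.length]
      (((edges.map (fun e => (min (e.getD 0 0) (e.getD 1 0), max (e.getD 0 0) (e.getD 1 0)))).filter
          (fun p => !(p.1 == p.2) && PySem.Set.contains (pvComp edges s) p.1)).dedup) = []))

instance (a : List Int) (edges : List (List Int)) : Decidable (Pre_solution a edges) := by
  unfold Pre_solution; infer_instance

def pvWitness_solution : List Int × List (List Int) := ([1, -1], [[0, 1]])

def Spec_solution (a : List Int) (edges : List (List Int)) (out : Int) : Prop :=
  out = solution_alt a edges
instance (a : List Int) (edges : List (List Int)) (out : Int) : Decidable (Spec_solution a edges out) := by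
  unfold Spec_solution; infer_instance

-- ===== CLAIM (what is proved, stated in full; the proofs are below) =====
def Claim_equal_solution : Prop := ∀ (a : List Int) (edges : List (List Int)),
  Dom_solution a edges → Pre_solution a edges → Spec_solution a edges (solution a edges)

-- ===== LEMMAS AND PROOFS =====

-- unfolding equations
lemma dfsA_zero (d curr a vis) : dfsA d 0 curr a vis = none := by simp [dfsA]
lemma dfsA_succ (d f curr a vis) :
    dfsA d (f + 1) curr a vis
      = goA d f curr (PySem.Dict.getD d curr PySem.Set.empty) a (PySem.Set.add vis curr) 0 := by
  simp [dfsA]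
lemma goA_nil (d f curr a vis cnt) :
    goA d f curr [] a vis cnt
      = some (PySem.List.pySetD a curr 0, vis, PySem.List.pyGetD a curr 0,
              |PySem.List.pyGetD a curr 0| + cnt) := by
  simp [goA]
lemma goA_cons (d f curr nxt ns' a vis cnt) :
    goA d f curr (nxt :: ns') a vis cnt
      = if PySem.Set.contains vis nxt then goA d f curr ns' a vis cnt
        else
          match dfsA d f nxt a vis with
          | none => none
          | some (a1, vis1, value, child) =>
              goA d f curr ns' (PySem.List.pySetD a1 curr (PySem.List.pyGetD a1 curr 0 + value))
                vis1 (cnt + child) := by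
  rw [goA]

lemma runB_succ (d f curr i cnt rest a vis) :
    runB d (f + 1) ((curr, i, cnt) :: rest) a vis
      = (let ns := PySem.Dict.getD d curr []
         if h : i < ns.length then
           let nxt := ns[i]
           if PySem.Set.contains vis nxt then runB d f ((curr, i + 1, cnt) :: rest) a vis
           else runB d f ((nxt, 0, 0) :: (curr, i + 1, cnt) :: rest) a (PySem.Set.add vis nxt)
         else
           let ret := PySem.List.pyGetD a curr 0
           let a' := PySem.List.pySetD a curr 0
           let child := |ret| + cnt
           match rest with
           | [] => some (a', ret, child)
           | (p, j, c) :: rs =>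
               runB d f ((p, j, c + child) :: rs)
                 (PySem.List.pySetD a' p (PySem.List.pyGetD a' p 0 + ret)) vis) := by
  rw [runB]


-- ---- characterisation of the two adjacency builds ----

lemma foldl_edges_pairs {ν : Type} (edges : List (List Int)) (dflt : ν) (upd : ν → Int → ν)
    (d0 : PySem.Dict Int ν) :
    edges.foldl (fun d e =>
      (d.modify (PySem.List.pyGetD e 0 0) dflt (fun s => upd s (PySem.List.pyGetD e 1 0))).modify
        (PySem.List.pyGetD e 1 0) dflt (fun s => upd s (PySem.List.pyGetD e 0 0))) d0
    = (pvPairs edges).foldl (fun d p => d.modify p.1 dflt (fun s => upd s p.2)) d0 := by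
  rw [pvPairs, List.foldl_flatMap]
  apply PySem.List.foldl_congr_mem
  intro acc e _
  simp [pysem]

lemma buildA_pairs (edges : List (List Int)) :
    buildA edges = (pvPairs edges).foldl
      (fun d p => d.modify p.1 PySem.Set.empty (fun s => PySem.Set.add s p.2)) PySem.Dict.empty := by
  unfold buildA
  exact foldl_edges_pairs edges PySem.Set.empty (fun s x => PySem.Set.add s x) PySem.Dict.empty

lemma getD_foldl_modify_setadd (l : List (Int × Int)) (d : PySem.Dict Int (PySem.Set Int)) (k : Int) :
    (l.foldl (fun d p => d.modify p.1 PySem.Set.empty (fun s => PySem.Set.add s p.2)) d).getD k PySem.Set.empty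
    = PySem.Set.update (d.getD k PySem.Set.empty) ((l.filter (fun p => p.1 == k)).map (·.2)) := by
  induction l generalizing d with
  | nil => simp [PySem.Set.update]
  | cons p l ih =>
    simp only [List.foldl_cons, List.filter_cons]
    rw [ih]
    by_cases h : p.1 = k
    · simp [h, PySem.Set.update]
    · have h' : ¬ k = p.1 := fun hh => h hh.symm
      simp [PySem.Dict.getD_modify, h, h', beq_iff_eq]

lemma getD_buildA (edges : List (List Int)) (k : Int) :
    PySem.Dict.getD (buildA edges) k PySem.Set.empty = PySem.Set.ofList (pvInc edges k) := by
  rw [buildA_pairs, getD_foldl_modify_setadd]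
  simp [PySem.Dict.getD_empty, pvInc]
  rfl

lemma keys_buildA (edges : List (List Int)) :
    (buildA edges).keys = PySem.Set.ofList (pvVerts edges) := by
  rw [buildA_pairs, PySem.Dict.keys_foldl_modify_key (pvPairs edges) (·.1) PySem.Set.empty _ PySem.Dict.empty]
  simp [PySem.Dict.keys_empty, pvVerts]
  rfl

lemma buildB_eq (edges : List (List Int)) : buildB edges = buildA edges := rfl

lemma pvPairs_length (edges : List (List Int)) : (pvPairs edges).length = 2 * edges.length := by
  induction edges with
  | nil => rfl
  | cons e es ih => simp [pvPairs] at ih ⊢; omega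

lemma getD_buildA_len (edges : List (List Int)) (k : Int) :
    (PySem.Dict.getD (buildA edges) k PySem.Set.empty).length ≤ 2 * edges.length := by
  rw [getD_buildA]
  calc (PySem.Set.ofList (pvInc edges k)).length ≤ (pvInc edges k).length :=
        PySem.Set.length_ofList_le _
    _ ≤ (pvPairs edges).length := by
        simpa [pvInc] using List.length_filter_le _ _
    _ = 2 * edges.length := pvPairs_length edges

lemma pvPairs_symm (edges : List (List Int)) {p : Int × Int} (hp : p ∈ pvPairs edges) :
    (p.2, p.1) ∈ pvPairs edges := by
  simp only [pvPairs, List.mem_flatMap] at hp ⊢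
  obtain ⟨e, he, hpe⟩ := hp
  refine ⟨e, he, ?_⟩
  simp only [List.mem_cons] at hpe ⊢
  rcases hpe with h | h | h
  · subst h; simp
  · subst h; simp
  · exact absurd h (List.not_mem_nil)

lemma mem_verts_of_mem_inc (edges : List (List Int)) {k x : Int} (hx : x ∈ pvInc edges k) :
    x ∈ pvVerts edges := by
  simp only [pvInc, List.mem_map, List.mem_filter] at hx
  obtain ⟨p, ⟨hp, hk⟩, hx2⟩ := hx
  have := pvPairs_symm edges hp
  subst hx2
  exact List.mem_map_of_mem (f := (·.1)) this


-- ---- start selection: the two ports find the same first degree-1 vertex ----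

lemma nodup_keys_buildA (edges : List (List Int)) : (buildA edges).keys.Nodup := by
  rw [keys_buildA]
  exact PySem.Set.nodup_ofList _

lemma findB_eq (edges : List (List Int)) :
    (PySem.Dict.items (buildB edges)).find? (fun kv => kv.2.length == 1)
      = ((PySem.Dict.keys (buildA edges)).find?
          (fun k => (PySem.Dict.getD (buildA edges) k PySem.Set.empty).length == 1)).map
        (fun k => (k, PySem.Dict.getD (buildB edges) k [])) := by
  rw [buildB_eq]
  rw [PySem.Dict.items_eq_map_keys (buildA edges) (nodup_keys_buildA edges) []]
  rw [List.find?_map]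
  rfl

-- ---- termination of A's dfs under Pre_ ----

def pvRem (K : List Int) (vis : PySem.Set Int) : Nat :=
  (K.filter (fun v => !(PySem.Set.contains vis v))).length

lemma mem_of_contains {vis : PySem.Set Int} {x : Int} (h : PySem.Set.contains vis x = true) :
    x ∈ vis := (PySem.Set.contains_iff vis x).mp h

lemma not_mem_of_not_contains {vis : PySem.Set Int} {x : Int}
    (h : PySem.Set.contains vis x = false) : x ∉ vis := by
  intro hx
  rw [(PySem.Set.contains_iff vis x).mpr hx] at h
  exact Bool.noConfusion h

lemma subset_add (vis : PySem.Set Int) (x : Int) : ∀ y ∈ vis, y ∈ PySem.Set.add vis x :=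
  fun y hy => (PySem.Set.mem_add vis x y).mpr (Or.inl hy)

lemma contains_add_eq (s : PySem.Set Int) (x y : Int) :
    PySem.Set.contains (PySem.Set.add s x) y = (PySem.Set.contains s y || y == x) := by
  cases h : PySem.Set.contains (PySem.Set.add s x) y
  · cases h2 : PySem.Set.contains s y
    · cases h3 : (y == x)
      · rfl
      · exfalso
        have hy : y ∈ PySem.Set.add s x :=
          (PySem.Set.mem_add s x y).mpr (Or.inr (by simpa using h3))
        rw [(PySem.Set.contains_iff _ _).mpr hy] at h
        exact Bool.noConfusion h
    · exfalso
      have hy : y ∈ PySem.Set.add s x :=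
        (PySem.Set.mem_add s x y).mpr (Or.inl ((PySem.Set.contains_iff _ _).mp h2))
      rw [(PySem.Set.contains_iff _ _).mpr hy] at h
      exact Bool.noConfusion h
  · have hy := (PySem.Set.contains_iff _ _).mp h
    rw [PySem.Set.mem_add] at hy
    rcases hy with h1 | h2
    · rw [(PySem.Set.contains_iff _ _).mpr h1]; rfl
    · simp [h2]

lemma pvRem_mono (K : List Int) {vis vis' : PySem.Set Int} (h : ∀ x ∈ vis, x ∈ vis') :
    pvRem K vis' ≤ pvRem K vis := by
  simp only [pvRem, ← List.countP_eq_length_filter]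
  apply List.countP_mono_left
  intro v _ hv
  cases hc : PySem.Set.contains vis v
  · rfl
  · exfalso
    rw [(PySem.Set.contains_iff vis' v).mpr (h v (mem_of_contains hc))] at hv
    exact Bool.noConfusion hv

lemma pvRem_add_lt (K : List Int) (vis : PySem.Set Int) (curr : Int)
    (hK : curr ∈ K) (hv : curr ∉ vis) :
    pvRem K (PySem.Set.add vis curr) < pvRem K vis := by
  have hcur : curr ∈ K.filter (fun v => !(PySem.Set.contains vis v)) := by
    rw [List.mem_filter]
    refine ⟨hK, ?_⟩
    cases hc : PySem.Set.contains vis curr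
    · rfl
    · exact absurd (mem_of_contains hc) hv
  have h1 : (fun v => !(PySem.Set.contains (PySem.Set.add vis curr) v))
      = fun v => (!(PySem.Set.contains vis v) && !(v == curr)) := by
    funext v
    rw [contains_add_eq, Bool.not_or]
  unfold pvRem
  rw [h1]
  have h2 : K.filter (fun v => (!(PySem.Set.contains vis v) && !(v == curr)))
      = (K.filter (fun v => !(PySem.Set.contains vis v))).filter (fun v => !(v == curr)) := by
    rw [List.filter_filter]
    simp [Bool.and_comm]
  rw [h2]
  exact List.length_filter_lt_length_iff_exists.mpr ⟨curr, hcur, by simp⟩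

lemma goA_success (d : PySem.Dict Int (PySem.Set Int)) (K : List Int)
    (f : Nat)
    (IH : ∀ curr a vis, curr ∈ K → curr ∉ vis → pvRem K vis ≤ f →
        ∃ a1 vis1 r c, dfsA d f curr a vis = some (a1, vis1, r, c) ∧ ∀ x ∈ vis, x ∈ vis1) :
    ∀ ns curr a (vis : PySem.Set Int) cnt, (∀ x ∈ ns, x ∈ K) → pvRem K vis ≤ f →
      ∃ a1 vis1 r c, goA d f curr ns a vis cnt = some (a1, vis1, r, c) ∧ ∀ x ∈ vis, x ∈ vis1 := by
  intro ns
  induction ns with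
  | nil =>
    intro curr a vis cnt _ _
    exact ⟨_, _, _, _, goA_nil d f curr a vis cnt, fun x hx => hx⟩
  | cons nxt ns' ih =>
    intro curr a vis cnt hmem hrem
    rw [goA_cons]
    cases hc : PySem.Set.contains vis nxt
    · simp only [Bool.false_eq_true, if_false]
      have hnx : nxt ∉ vis := not_mem_of_not_contains hc
      obtain ⟨a1, vis1, r, c, hd, hsub⟩ :=
        IH nxt a vis (hmem nxt List.mem_cons_self) hnx hrem
      rw [hd]
      obtain ⟨a2, vis2, r2, c2, hg, hsub2⟩ :=
        ih curr (PySem.List.pySetD a1 curr (PySem.List.pyGetD a1 curr 0 + r)) vis1 (cnt + c)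
          (fun x hx => hmem x (List.mem_cons_of_mem nxt hx))
          (le_trans (pvRem_mono K hsub) hrem)
      exact ⟨a2, vis2, r2, c2, hg, fun x hx => hsub2 x (hsub x hx)⟩
    · simp only [if_true]
      exact ih curr a vis cnt (fun x hx => hmem x (List.mem_cons_of_mem nxt hx)) hrem

lemma dfsA_success (d : PySem.Dict Int (PySem.Set Int)) (K : List Int)
    (Hnb : ∀ k x, x ∈ (PySem.Dict.getD d k PySem.Set.empty : List Int) → x ∈ K) :
    ∀ f curr a (vis : PySem.Set Int), curr ∈ K → curr ∉ vis → pvRem K vis ≤ f →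
      ∃ a1 vis1 r c, dfsA d f curr a vis = some (a1, vis1, r, c) ∧ ∀ x ∈ vis, x ∈ vis1 := by
  intro f
  induction f with
  | zero =>
    intro curr a vis hK hv hrem
    exfalso
    have : curr ∈ K.filter (fun v => !(PySem.Set.contains vis v)) := by
      rw [List.mem_filter]
      refine ⟨hK, ?_⟩
      cases hc : PySem.Set.contains vis curr
      · rfl
      · exact absurd (mem_of_contains hc) hv
    have hlen : 0 < pvRem K vis := by
      unfold pvRem
      exact List.length_pos_of_mem this
    omega
  | succ f ihf =>
    intro curr a vis hK hv hrem
    rw [dfsA_succ]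
    have hrem' : pvRem K (PySem.Set.add vis curr) ≤ f := by
      have := pvRem_add_lt K vis curr hK hv
      omega
    obtain ⟨a1, vis1, r, c, hg, hsub⟩ :=
      goA_success d K f ihf (PySem.Dict.getD d curr PySem.Set.empty) curr a
        (PySem.Set.add vis curr) 0 (fun x hx => Hnb curr x hx) hrem'
    exact ⟨a1, vis1, r, c, hg, fun x hx => hsub x (subset_add vis curr x hx)⟩


-- ---- simulation: B's stack machine performs exactly A's recursion ----

-- state of the machine after the frame of `curr` has been popped
def popK (dB : PySem.Dict Int (List Int)) (g : Nat) (stack : List (Int × Nat × Int))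
    (a1 : List Int) (vis1 : PySem.Set Int) (r c : Int) : Option (List Int × Int × Int) :=
  match stack with
  | [] => some (a1, r, c)
  | (p, j, cc) :: rs =>
      runB dB g ((p, j, cc + c) :: rs)
        (PySem.List.pySetD a1 p (PySem.List.pyGetD a1 p 0 + r)) vis1

lemma sim_go (dA : PySem.Dict Int (PySem.Set Int)) (dB : PySem.Dict Int (List Int)) (L : Nat)
    (Heq : ∀ k, (PySem.Dict.getD dA k PySem.Set.empty : List Int) = PySem.Dict.getD dB k [])
    (f : Nat)
    (IH : ∀ curr a vis a1 vis1 r c, dfsA dA f curr a vis = some (a1, vis1, r, c) →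
      ∃ n, n ≤ (L + 2) ^ (f + 1) ∧ ∀ stack g,
        runB dB (n + g) ((curr, 0, 0) :: stack) a (PySem.Set.add vis curr)
          = popK dB g stack a1 vis1 r c) :
    ∀ ns (i : Nat) curr a (vis : PySem.Set Int) cnt a1 vis1 r c,
      goA dA f curr ns a vis cnt = some (a1, vis1, r, c) →
      ns = (PySem.Dict.getD dA curr PySem.Set.empty : List Int).drop i →
      ∃ n, n ≤ ns.length * ((L + 2) ^ (f + 1) + 1) + 1 ∧ ∀ stack g,
        runB dB (n + g) ((curr, i, cnt) :: stack) a vis = popK dB g stack a1 vis1 r c := by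
  intro ns
  induction ns with
  | nil =>
    intro i curr a vis cnt a1 vis1 r c hgo hdrop
    rw [goA_nil] at hgo
    simp only [Option.some.injEq, Prod.mk.injEq] at hgo
    obtain ⟨h1, h2, h3, h4⟩ := hgo
    subst h1; subst h2; subst h3; subst h4
    have hlen : (PySem.Dict.getD dB curr []).length ≤ i := by
      rw [← Heq curr]
      exact List.drop_eq_nil_iff.mp hdrop.symm
    refine ⟨1, by omega, ?_⟩
    intro stack g
    have hfuel : (1 : Nat) + g = g + 1 := by omega
    rw [hfuel, runB_succ, dif_neg (by omega)]
    cases stack with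
    | nil => simp [popK]
    | cons fr rs =>
      obtain ⟨p, j, cc⟩ := fr
      simp only [popK]
  | cons nxt ns' ih =>
    intro i curr a vis cnt a1 vis1 r c hgo hdrop
    have hiA : i < (PySem.Dict.getD dA curr PySem.Set.empty : List Int).length := by
      by_contra hcon
      rw [List.drop_eq_nil_iff.mpr (by omega)] at hdrop
      exact List.cons_ne_nil _ _ hdrop
    have hiB : i < (PySem.Dict.getD dB curr []).length := by rw [← Heq curr]; exact hiA
    have hgetB : (PySem.Dict.getD dB curr [])[i]'hiB = nxt := by
      have := List.drop_eq_getElem_cons hiA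
      rw [this] at hdrop
      have : (PySem.Dict.getD dA curr PySem.Set.empty : List Int)[i]'hiA = nxt :=
        (List.cons.injEq .. ▸ hdrop.symm).1
      simp only [← Heq curr]
      exact this
    have hdrop' : ns' = (PySem.Dict.getD dA curr PySem.Set.empty : List Int).drop (i + 1) := by
      have := List.drop_eq_getElem_cons hiA
      rw [this] at hdrop
      exact (List.cons.injEq .. ▸ hdrop.symm).2.symm
    rw [goA_cons] at hgo
    cases hc : PySem.Set.contains vis nxt with
    | true =>
      rw [hc, if_pos rfl] at hgo
      obtain ⟨n', hn', hrun⟩ := ih (i + 1) curr a vis cnt a1 vis1 r c hgo hdrop'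
      refine ⟨n' + 1, ?_, ?_⟩
      · simp only [List.length_cons]
        rw [Nat.succ_mul]
        omega
      · intro stack g
        have hfuel : n' + 1 + g = (n' + g) + 1 := by omega
        rw [hfuel, runB_succ, dif_pos hiB]
        simp only [hgetB, hc]
        rw [if_pos trivial]
        exact hrun stack g
    | false =>
      rw [hc, if_neg (by simp)] at hgo
      cases hdfs : dfsA dA f nxt a vis with
      | none => rw [hdfs] at hgo; exact absurd hgo (by simp)
      | some out =>
        obtain ⟨a2, vis2, value, child⟩ := out
        rw [hdfs] at hgo
        simp only [] at hgo
        obtain ⟨n1, hn1, hrun1⟩ := IH nxt a vis a2 vis2 value child hdfs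
        obtain ⟨n2, hn2, hrun2⟩ := ih (i + 1) curr
          (PySem.List.pySetD a2 curr (PySem.List.pyGetD a2 curr 0 + value)) vis2 (cnt + child)
          a1 vis1 r c hgo hdrop'
        refine ⟨1 + n1 + n2, ?_, ?_⟩
        · simp only [List.length_cons]
          rw [Nat.succ_mul]
          omega
        · intro stack g
          have hfuel : 1 + n1 + n2 + g = (n1 + (n2 + g)) + 1 := by omega
          rw [hfuel, runB_succ, dif_pos hiB]
          simp only [hgetB, hc]
          rw [if_neg (by simp)]
          rw [hrun1 ((curr, i + 1, cnt) :: stack) (n2 + g)]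
          simp only [popK]
          exact hrun2 stack g

lemma sim_dfs (dA : PySem.Dict Int (PySem.Set Int)) (dB : PySem.Dict Int (List Int)) (L : Nat)
    (Heq : ∀ k, (PySem.Dict.getD dA k PySem.Set.empty : List Int) = PySem.Dict.getD dB k [])
    (HL : ∀ k, (PySem.Dict.getD dA k PySem.Set.empty).length ≤ L) :
    ∀ f curr a (vis : PySem.Set Int) a1 vis1 r c,
      dfsA dA f curr a vis = some (a1, vis1, r, c) →
      ∃ n, n ≤ (L + 2) ^ (f + 1) ∧ ∀ stack g,
        runB dB (n + g) ((curr, 0, 0) :: stack) a (PySem.Set.add vis curr)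
          = popK dB g stack a1 vis1 r c := by
  intro f
  induction f with
  | zero =>
    intro curr a vis a1 vis1 r c h
    rw [dfsA_zero] at h
    exact absurd h (by simp)
  | succ f ihf =>
    intro curr a vis a1 vis1 r c h
    rw [dfsA_succ] at h
    obtain ⟨n, hn, hrun⟩ := sim_go dA dB L Heq f ihf
      (PySem.Dict.getD dA curr PySem.Set.empty) 0 curr a (PySem.Set.add vis curr) 0
      a1 vis1 r c h (by simp)
    refine ⟨n, ?_, hrun⟩
    have hlen := HL curr
    have hp : L + 2 ≤ (L + 2) ^ (f + 1) := Nat.le_self_pow (by omega) _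
    have hexp : (L + 2) ^ (f + 1 + 1) = (L + 2) ^ (f + 1) * (L + 2) := pow_succ _ _
    have hmul : (PySem.Dict.getD dA curr PySem.Set.empty : List Int).length * ((L + 2) ^ (f + 1) + 1)
        ≤ L * ((L + 2) ^ (f + 1) + 1) := Nat.mul_le_mul_right _ hlen
    have hmul2 : L * ((L + 2) ^ (f + 1) + 1) = L * (L + 2) ^ (f + 1) + L := by ring
    have hmul3 : (L + 2) ^ (f + 1) * (L + 2) = L * (L + 2) ^ (f + 1) + 2 * (L + 2) ^ (f + 1) := by
      ring
    omega

-- ===== VERDICT (by name: the statement is the Claim_ definition above) =====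
theorem solution_spec : Claim_equal_solution := by
  intro a edges _hDom hPre
  unfold Spec_solution
  obtain ⟨_h1, _h2, ⟨v, hv, hlen1⟩, _hcomp⟩ := hPre
  have Heq : ∀ k, (PySem.Dict.getD (buildA edges) k PySem.Set.empty : List Int)
      = PySem.Dict.getD (buildB edges) k [] := by
    intro k; rw [buildB_eq]; rfl
  -- the two ports pick the same start vertex
  have hSome : ((buildA edges).keys.find?
      (fun k => (PySem.Dict.getD (buildA edges) k PySem.Set.empty).length == 1)).isSome := by
    rw [List.isSome_find?, List.any_eq_true]
    refine ⟨v, ?_, ?_⟩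
    · rw [keys_buildA]; exact (PySem.Set.mem_ofList _ _).mpr hv
    · rw [getD_buildA]
      simp [hlen1]
  obtain ⟨s, hs⟩ := Option.isSome_iff_exists.mp hSome
  have hfindB := findB_eq edges
  rw [hs] at hfindB
  -- A's dfs succeeds under Pre_
  have Hnb : ∀ k x, x ∈ (PySem.Dict.getD (buildA edges) k PySem.Set.empty : List Int) →
      x ∈ PySem.Set.ofList (pvVerts edges) := by
    intro k x hx
    rw [getD_buildA] at hx
    exact (PySem.Set.mem_ofList _ _).mpr
      (mem_verts_of_mem_inc edges ((PySem.Set.mem_ofList _ _).mp hx))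
  have hsK : s ∈ PySem.Set.ofList (pvVerts edges) := by
    rw [← keys_buildA]; exact List.mem_of_find?_eq_some hs
  have hrem0 : pvRem (PySem.Set.ofList (pvVerts edges)) PySem.Set.empty ≤ 2 * edges.length + 2 := by
    have hle1 : pvRem (PySem.Set.ofList (pvVerts edges)) PySem.Set.empty
        ≤ (PySem.Set.ofList (pvVerts edges)).length := List.length_filter_le _ _
    have hle2 := PySem.Set.length_ofList_le (pvVerts edges)
    have hle3 : (pvVerts edges).length = 2 * edges.length := by
      rw [pvVerts, List.length_map, pvPairs_length]
    omega
  obtain ⟨a1, vis1, r, c, hrun, _⟩ :=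
    dfsA_success (buildA edges) (PySem.Set.ofList (pvVerts edges)) Hnb
      (2 * edges.length + 2) s a PySem.Set.empty hsK (List.not_mem_nil) hrem0
  -- B's machine simulates it
  obtain ⟨n, hn, hsim⟩ :=
    sim_dfs (buildA edges) (buildB edges) (2 * edges.length) Heq (getD_buildA_len edges)
      (2 * edges.length + 2) s a PySem.Set.empty a1 vis1 r c hrun
  have hexp : 2 * edges.length + 2 + 1 = 2 * edges.length + 3 := by omega
  rw [hexp] at hn
  have hrunB : runB (buildB edges) ((2 * edges.length + 2) ^ (2 * edges.length + 3) + 1)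
      [(s, 0, 0)] a (PySem.Set.add PySem.Set.empty s) = some (a1, r, c) := by
    have h := hsim [] (((2 * edges.length + 2) ^ (2 * edges.length + 3) + 1) - n)
    rw [Nat.add_sub_cancel' (by omega)] at h
    exact h
  simp only [solution, solution_alt, hs, hfindB, Option.map_some, hrun, hrunB]
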